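-- pv_equiv track=rewrite | github.com/jphan14/lcf-civic-summaries | utils/append_to_archive.py | is_duplicate_document
-- ===== SOURCE A (Python) =====
-- def is_duplicate_document(new_doc, existing_docs):
--     """Check if a document already exists in the archive."""
--     for existing_doc in existing_docs:
--         # Check by title and date
--         if (new_doc.get('title', '').strip() == existing_doc.get('title', '').strip() and
--             new_doc.get('date', '') == existing_doc.get('date', '')):
--             return True
--
--         # Check by URL if available
--         if (new_doc.get('url', '') and existing_doc.get('url', '') and
--             new_doc['url'] == existing_doc['url']):
--             return True
--
--     return False
-- ===== SOURCE B (Python) =====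
-- def _signatures(doc):
--     """The identity fingerprints of a document: a title/date signature, plus a url signature if the url is truthy."""
--     sigs = {('td', doc.get('title', '').strip(), doc.get('date', ''))}
--     url = doc.get('url', '')
--     if url:
--         sigs.add(('url', url, ''))
--     return sigs
--
-- def is_duplicate_document(new_doc, existing_docs):
--     """Duplicate iff the new document's fingerprint set overlaps the pooled fingerprints of the archive."""
--     pool = set()
--     for doc in existing_docs:
--         pool |= _signatures(doc)
--     return not _signatures(new_doc).isdisjoint(pool)
-- ===== Notes on version B (the rewrite author's own statement) =====
-- stated objective: alternative
-- what changed: Replaces A's asymmetric per-document field comparisons (title/date check, then guarded url check, early return) with a symmetric fingerprinting scheme: every document is mapped to a set of tagged signatures (('td', stripped title, date); ('url', url) only when truthy), all existing signatures are pooled into one set, and the answer is non-disjointness of the new document's signature set with the pool.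
import Mathlib
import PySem

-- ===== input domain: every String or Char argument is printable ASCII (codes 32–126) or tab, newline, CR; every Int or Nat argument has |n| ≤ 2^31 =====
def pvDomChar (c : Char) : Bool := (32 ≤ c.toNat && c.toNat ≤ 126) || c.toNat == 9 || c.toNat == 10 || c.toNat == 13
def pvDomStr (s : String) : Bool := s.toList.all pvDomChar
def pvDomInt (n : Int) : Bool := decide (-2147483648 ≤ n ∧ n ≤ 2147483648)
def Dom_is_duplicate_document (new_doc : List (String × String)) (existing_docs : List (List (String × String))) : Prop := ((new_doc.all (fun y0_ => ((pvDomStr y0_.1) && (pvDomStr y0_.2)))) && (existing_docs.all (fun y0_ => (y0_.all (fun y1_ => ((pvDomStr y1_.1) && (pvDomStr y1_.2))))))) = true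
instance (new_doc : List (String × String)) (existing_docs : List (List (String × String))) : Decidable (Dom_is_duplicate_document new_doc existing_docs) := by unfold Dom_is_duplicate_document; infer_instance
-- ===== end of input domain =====

-- B maps every document to a set of tagged signatures, pools the archive's signatures into one set,
-- and decides by set non-disjointness, replacing A's early-return per-document field comparisons.
-- Objective: alternative (same cost, different algorithm shape).

-- ===== PORT A =====
-- the loop body of A: test one existing_doc, else recurse (early return = returning true)
def pvLoopA (new_doc : List (String × String)) : List (List (String × String)) → Bool
  | [] => false
  | d :: rest =>
    if (PySem.Str.strip (PySem.Dict.getD ⟨new_doc⟩ "title" "") == PySem.Str.strip (PySem.Dict.getD ⟨d⟩ "title" "")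
        && PySem.Dict.getD ⟨new_doc⟩ "date" "" == PySem.Dict.getD ⟨d⟩ "date" "") then true
    else if (PySem.Dict.getD ⟨new_doc⟩ "url" "" ≠ "" && PySem.Dict.getD ⟨d⟩ "url" "" ≠ ""
        -- new_doc['url'] / existing_doc['url']: guarded by the truthiness tests the keys are present,
        -- so the plain lookups equal the getD values (exact here)
        && PySem.Dict.getD ⟨new_doc⟩ "url" "" == PySem.Dict.getD ⟨d⟩ "url" "") then true
    else pvLoopA new_doc rest

def is_duplicate_document (new_doc : List (String × String)) (existing_docs : List (List (String × String))) : Bool :=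
  pvLoopA new_doc existing_docs

-- ===== PORT B =====
-- _signatures(doc): the tagged fingerprints of one document
def pvSigs (doc : List (String × String)) : PySem.Set (String × String × String) :=
  let base := PySem.Set.add PySem.Set.empty
    ("td", PySem.Str.strip (PySem.Dict.getD ⟨doc⟩ "title" ""), PySem.Dict.getD ⟨doc⟩ "date" "")
  let url := PySem.Dict.getD ⟨doc⟩ "url" ""
  if url ≠ "" then PySem.Set.add base ("url", url, "") else base

def is_duplicate_document_alt (new_doc : List (String × String)) (existing_docs : List (List (String × String))) : Bool :=
  let pool := existing_docs.foldl (fun s d => PySem.Set.union s (pvSigs d)) PySem.Set.empty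
  !(PySem.Set.isdisjoint (pvSigs new_doc) pool)

-- ===== PRECONDITION & SPEC =====
def Spec_is_duplicate_document (new_doc : List (String × String)) (existing_docs : List (List (String × String))) (out : Bool) : Prop := out = is_duplicate_document_alt new_doc existing_docs
instance (new_doc : List (String × String)) (existing_docs : List (List (String × String))) (out : Bool) : Decidable (Spec_is_duplicate_document new_doc existing_docs out) := by unfold Spec_is_duplicate_document; infer_instance

-- ===== CLAIM =====
def Claim_equal_is_duplicate_document : Prop := ∀ (new_doc : List (String × String)) (existing_docs : List (List (String × String))), Dom_is_duplicate_document new_doc existing_docs → Spec_is_duplicate_document new_doc existing_docs (is_duplicate_document new_doc existing_docs)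

-- ===== LEMMAS AND PROOFS =====

-- A's scan is the disjunction over existing_docs
theorem pvLoopA_eq_any (new_doc : List (String × String)) (docs : List (List (String × String))) :
    pvLoopA new_doc docs = docs.any (fun d =>
      (PySem.Str.strip (PySem.Dict.getD ⟨new_doc⟩ "title" "") == PySem.Str.strip (PySem.Dict.getD ⟨d⟩ "title" "")
        && PySem.Dict.getD ⟨new_doc⟩ "date" "" == PySem.Dict.getD ⟨d⟩ "date" "")
      || (PySem.Dict.getD ⟨new_doc⟩ "url" "" ≠ "" && PySem.Dict.getD ⟨d⟩ "url" "" ≠ ""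
        && PySem.Dict.getD ⟨new_doc⟩ "url" "" == PySem.Dict.getD ⟨d⟩ "url" "")) := by
  induction docs with
  | nil => rfl
  | cons d rest ih =>
    simp only [pvLoopA, List.any_cons]
    split_ifs with h1 h2 <;> simp_all

-- membership in one document's signature set
theorem mem_pvSigs (doc : List (String × String)) (x : String × String × String) :
    x ∈ pvSigs doc ↔
      x = ("td", PySem.Str.strip (PySem.Dict.getD ⟨doc⟩ "title" ""), PySem.Dict.getD ⟨doc⟩ "date" "")
      ∨ (PySem.Dict.getD ⟨doc⟩ "url" "" ≠ "" ∧ x = ("url", PySem.Dict.getD ⟨doc⟩ "url" "", "")) := by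
  unfold pvSigs
  by_cases h : PySem.Dict.getD ⟨doc⟩ "url" "" ≠ ""
  · simp [h, PySem.Set.empty]
  · simp [h, PySem.Set.empty]

-- membership in the pooled union fold
theorem mem_pool (docs : List (List (String × String))) (s : PySem.Set (String × String × String))
    (x : String × String × String) :
    (x ∈ docs.foldl (fun s d => PySem.Set.union s (pvSigs d)) s) ↔ x ∈ s ∨ ∃ d ∈ docs, x ∈ pvSigs d := by
  induction docs generalizing s with
  | nil => simp
  | cons d rest ih =>
    simp only [List.foldl_cons, ih, PySem.Set.mem_union]
    constructor
    · rintro ((h | h) | ⟨d', hd', h⟩)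
      · exact Or.inl h
      · exact Or.inr ⟨d, by simp, h⟩
      · exact Or.inr ⟨d', by simp [hd'], h⟩
    · rintro (h | ⟨d', hd', h⟩)
      · exact Or.inl (Or.inl h)
      · rcases List.mem_cons.mp hd' with heq | hd'
        · subst heq; exact Or.inl (Or.inr h)
        · exact Or.inr ⟨d', hd', h⟩

-- ===== VERDICT =====
theorem is_duplicate_document_spec : Claim_equal_is_duplicate_document := by
  intro new_doc docs _
  unfold Spec_is_duplicate_document is_duplicate_document is_duplicate_document_alt
  rw [pvLoopA_eq_any, Bool.eq_iff_iff]
  simp only [Bool.not_eq_eq_eq_not, Bool.not_true, List.any_eq_true, Bool.or_eq_true, Bool.and_eq_true, beq_iff_eq, decide_eq_true_eq]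
  rw [show (PySem.Set.isdisjoint (pvSigs new_doc)
        (docs.foldl (fun s d => PySem.Set.union s (pvSigs d)) PySem.Set.empty) = false)
      ↔ ∃ x ∈ pvSigs new_doc, x ∈ docs.foldl (fun s d => PySem.Set.union s (pvSigs d)) PySem.Set.empty by
    rw [← Bool.not_eq_true, PySem.Set.isdisjoint_iff]; push_neg; simp]
  constructor
  · rintro ⟨d, hd, (⟨ht, hdate⟩ | ⟨⟨hu, hud⟩, he⟩)⟩
    · refine ⟨("td", PySem.Str.strip (PySem.Dict.getD ⟨new_doc⟩ "title" ""), PySem.Dict.getD ⟨new_doc⟩ "date" ""),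
        (mem_pvSigs _ _).mpr (Or.inl rfl), (mem_pool _ _ _).mpr (Or.inr ⟨d, hd, ?_⟩)⟩
      exact (mem_pvSigs _ _).mpr (Or.inl (by simp [ht, hdate]))
    · refine ⟨("url", PySem.Dict.getD ⟨new_doc⟩ "url" "", ""),
        (mem_pvSigs _ _).mpr (Or.inr ⟨hu, rfl⟩), (mem_pool _ _ _).mpr (Or.inr ⟨d, hd, ?_⟩)⟩
      exact (mem_pvSigs _ _).mpr (Or.inr ⟨hud, by simp [he]⟩)
  · rintro ⟨x, hxn, hxp⟩
    rcases (mem_pool _ _ _).mp hxp with h | ⟨d, hd, hxd⟩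
    · simp [PySem.Set.empty] at h
    rcases (mem_pvSigs _ _).mp hxn with hn | ⟨hu, hn⟩ <;>
      rcases (mem_pvSigs _ _).mp hxd with he | ⟨hud, he⟩ <;> subst hn
    · exact ⟨d, hd, Or.inl ⟨(congrArg (fun p => p.2.1) he), (congrArg (fun p => p.2.2) he)⟩⟩
    · exact absurd (congrArg Prod.fst he) (by simp)
    · exact absurd (congrArg Prod.fst he) (by simp)
    · exact ⟨d, hd, Or.inr ⟨⟨hu, hud⟩, (congrArg (fun p => p.2.1) he)⟩⟩
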